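-- pv_equiv track=rewrite | github.com/lvxiaodong-dev/stock | libs/MyTA.py | FINDLOWBARS
-- ===== SOURCE A (Python) =====
-- def FINDLOWBARS(data, n, m, t):
--     count = len(data)
--     result = [10000] * count
--     values = [None] * count
--     for i in range(count - 1, -1, -1):
--         aryValue = []
--         for j in range(n, m):
--             index = i - j
--             if index < 0:
--                 break
--             item = data[index]
--             aryValue.append({"Value": item, "Period": j})
--         if len(aryValue) > 0:
--             aryValue.sort(key=lambda x: x["Value"])
--             index = t - 1 if t > 0 else 0
--             index = min(index, len(aryValue) - 1)
--             result[i] = aryValue[index]["Period"]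
--             values[i] = aryValue[index]["Value"]
--     return result, values
-- ===== SOURCE B (Python) =====
-- import bisect
--
-- def FINDLOWBARS(data, n, m, t):
--     count = len(data)
--     result = [10000] * count
--     values = [None] * count
--     if m <= n:
--         return result, values
--     k0 = t - 1 if t > 0 else 0
--     win = []  # sorted list of (value, -index): lexicographic = by value, ties -> larger index (smaller period) first
--     for i in range(count):
--         if i - n >= 0:
--             bisect.insort(win, (data[i - n], -(i - n)))
--         if i - m >= 0:
--             win.remove((data[i - m], -(i - m)))
--         if win:
--             v, negidx = win[min(k0, len(win) - 1)]
--             result[i] = i + negidx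
--             values[i] = v
--     return result, values
-- ===== Notes on version B (the rewrite author's own statement) =====
-- stated objective: faster
-- what changed: Instead of rebuilding and fully re-sorting the whole lookback window at every index (backward loop, sort, pick k-th), B does one forward sweep that maintains a single sorted sliding-window list of (value, -index) pairs via bisect.insort / list.remove and answers each index with one clamped k-th lookup.
import Mathlib
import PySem

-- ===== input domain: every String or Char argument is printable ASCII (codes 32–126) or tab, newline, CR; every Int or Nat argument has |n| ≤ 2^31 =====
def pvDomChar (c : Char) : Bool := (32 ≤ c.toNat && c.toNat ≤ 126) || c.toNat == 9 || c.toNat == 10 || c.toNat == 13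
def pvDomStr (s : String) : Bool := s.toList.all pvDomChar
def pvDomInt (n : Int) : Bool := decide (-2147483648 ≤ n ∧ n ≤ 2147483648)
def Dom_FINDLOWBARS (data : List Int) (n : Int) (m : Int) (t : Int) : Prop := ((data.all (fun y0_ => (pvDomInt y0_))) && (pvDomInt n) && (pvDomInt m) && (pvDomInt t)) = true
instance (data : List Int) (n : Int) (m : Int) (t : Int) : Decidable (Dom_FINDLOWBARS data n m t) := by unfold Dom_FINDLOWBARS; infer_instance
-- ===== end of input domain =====

-- B replaces A's per-index rebuild-and-sort of the lookback window by one forward sweep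
-- maintaining a single incrementally updated sorted window (insert/remove + k-th lookup): faster.

-- ===== PORT A =====
-- inner loop 'for j in range(n, m): index = i - j; if index < 0: break; item = data[index]; aryValue.append(...)'
-- (an item {"Value": v, "Period": j} is ported as the pair (v, j))
def aryBuild (data : List Int) (i : Int) (m : Int) (j : Int) (acc : List (Int × Int)) :
    List (Int × Int) :=
  if h : j < m then
    if i - j < 0 then acc
    else
      match PySem.List.pyGet? data (i - j) with
      | some item => aryBuild data i m (j + 1) (acc ++ [(item, j)])
      | none => acc   -- Python raises IndexError here (only reachable when n < 0; outside Pre_)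
  else acc
termination_by (m - j).toNat
decreasing_by omega

-- loop body of 'for i in range(count - 1, -1, -1)'
def stepA (data : List Int) (n : Int) (m : Int) (t : Int)
    (rv : List Int × List (Option Int)) (i : Int) : List Int × List (Option Int) :=
  let aryValue := aryBuild data i m n []
  if aryValue.length > 0 then
    let aryValue := PySem.List.sorted aryValue (fun x => x.1) false
    let index : Int := if t > 0 then t - 1 else 0
    let index : Int := min index (PySem.List.len aryValue - 1)
    let sel := PySem.List.pyGetD aryValue index (0, 0)   -- 0 ≤ index < len always holds here
    (PySem.List.pySetD rv.1 i sel.2, PySem.List.pySetD rv.2 i (some sel.1))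
  else rv

def FINDLOWBARS (data : List Int) (n : Int) (m : Int) (t : Int) :
    List Int × List (Option Int) :=
  let count := PySem.List.len data
  let result : List Int := PySem.List.pyRepeat [10000] count
  let values : List (Option Int) := PySem.List.pyRepeat [none] count
  (PySem.List.pyRange (count - 1) (-1) (-1)).foldl (stepA data n m t) (result, values)

-- ===== PORT B =====
-- bisect.insort on (Int, Int) tuples: lexicographic insertion into a sorted list
def insortLex : List (Int × Int) → Int × Int → List (Int × Int)
  | [], p => [p]
  | q :: rest, p =>
    if p.1 < q.1 ∨ (p.1 = q.1 ∧ p.2 < q.2) then p :: q :: rest else q :: insortLex rest p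

-- loop body of 'for i in range(count)'
def stepB (data : List Int) (n : Int) (m : Int) (k0 : Int)
    (st : (List Int × List (Option Int)) × List (Int × Int)) (i : Int) :
    (List Int × List (Option Int)) × List (Int × Int) :=
  let win := if 0 ≤ i - n then insortLex st.2 (PySem.List.pyGetD data (i - n) 0, -(i - n)) else st.2
  let win := if 0 ≤ i - m then
      (PySem.List.remove? win (PySem.List.pyGetD data (i - m) 0, -(i - m))).getD win
    else win
  if win.length > 0 then
    let sel := PySem.List.pyGetD win (min k0 (PySem.List.len win - 1)) (0, 0)
    ((PySem.List.pySetD st.1.1 i (i + sel.2), PySem.List.pySetD st.1.2 i (some sel.1)), win)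
  else (st.1, win)

def FINDLOWBARS_alt (data : List Int) (n : Int) (m : Int) (t : Int) :
    List Int × List (Option Int) :=
  let count := PySem.List.len data
  let result : List Int := PySem.List.pyRepeat [10000] count
  let values : List (Option Int) := PySem.List.pyRepeat [none] count
  if m ≤ n then (result, values)
  else
    let k0 : Int := if t > 0 then t - 1 else 0
    ((PySem.List.pyRange 0 count 1).foldl (stepB data n m k0) ((result, values), [])).1

-- ===== PRECONDITION & SPEC =====
-- Pre_ excludes exactly the inputs on which A raises IndexError: a negative window start n
-- together with a non-empty data list and a non-empty range(n, m) makes A read data[i - j]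
-- past the end of the list (B raises there too).
def Pre_FINDLOWBARS (data : List Int) (n : Int) (m : Int) (t : Int) : Prop :=
  data = [] ∨ m ≤ n ∨ 0 ≤ n
instance (data : List Int) (n : Int) (m : Int) (t : Int) : Decidable (Pre_FINDLOWBARS data n m t) := by
  unfold Pre_FINDLOWBARS; infer_instance

def pvWitness_FINDLOWBARS : List Int × Int × Int × Int := ([5, 1, 4, 2, 3], 1, 4, 2)

def Spec_FINDLOWBARS (data : List Int) (n : Int) (m : Int) (t : Int)
    (out : List Int × List (Option Int)) : Prop := out = FINDLOWBARS_alt data n m t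
instance (data : List Int) (n : Int) (m : Int) (t : Int) (out : List Int × List (Option Int)) :
    Decidable (Spec_FINDLOWBARS data n m t out) := by unfold Spec_FINDLOWBARS; infer_instance

-- ===== CLAIM (what is proved, stated in full; the proofs are below) =====
def Claim_equal_FINDLOWBARS : Prop := ∀ (data : List Int) (n : Int) (m : Int) (t : Int), Dom_FINDLOWBARS data n m t → Pre_FINDLOWBARS data n m t → Spec_FINDLOWBARS data n m t (FINDLOWBARS data n m t)

-- ===== LEMMAS AND PROOFS =====

-- the lexicographic strict order on (value, -index) pairs
def lexR (a b : Int × Int) : Prop := a.1 < b.1 ∨ (a.1 = b.1 ∧ a.2 < b.2)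

lemma lexR_trans {a b c : Int × Int} (h1 : lexR a b) (h2 : lexR b c) : lexR a c := by
  unfold lexR at *; omega

lemma lexR_total_of_ne {a b : Int × Int} (h1 : ¬ lexR a b) (h2 : b.2 ≠ a.2) : lexR b a := by
  unfold lexR at *; omega

-- value at position i (total lookup; used only at in-range nonnegative positions)
def dAt (data : List Int) (i : Int) : Int := PySem.List.pyGetD data i 0

-- window of source indexes contributing at position i, in increasing order
def idxs (n m i : Int) : List Int :=
  PySem.List.pyRange (max 0 (i - m + 1)) (i - n + 1) 1

def pairsOf (data : List Int) (n m i : Int) : List (Int × Int) :=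
  (idxs n m i).map (fun idx => (dAt data idx, -idx))

-- canonical sorted window contents at position i
def winSpec (data : List Int) (n m i : Int) : List (Int × Int) :=
  (pairsOf data n m i).foldl insortLex []

-- A's window list at position i, as a closed comprehension
def aryOf (data : List Int) (n m i : Int) : List (Int × Int) :=
  (PySem.List.pyRange n (min m (i + 1)) 1).map (fun j => (dAt data (i - j), j))

-- the two win-updates of stepB, as one function
def winUpd (data : List Int) (n m : Int) (w : List (Int × Int)) (i : Int) : List (Int × Int) :=
  let w1 := if 0 ≤ i - n then insortLex w (PySem.List.pyGetD data (i - n) 0, -(i - n)) else w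
  if 0 ≤ i - m then
    (PySem.List.remove? w1 (PySem.List.pyGetD data (i - m) 0, -(i - m))).getD w1
  else w1

lemma stepB_eq (data : List Int) (n m k0 : Int)
    (st : (List Int × List (Option Int)) × List (Int × Int)) (i : Int) :
    stepB data n m k0 st i =
      (if (winUpd data n m st.2 i).length > 0 then
        ((PySem.List.pySetD st.1.1 i
            (i + (PySem.List.pyGetD (winUpd data n m st.2 i)
              (min k0 (PySem.List.len (winUpd data n m st.2 i) - 1)) (0, 0)).2),
          PySem.List.pySetD st.1.2 i
            (some (PySem.List.pyGetD (winUpd data n m st.2 i)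
              (min k0 (PySem.List.len (winUpd data n m st.2 i) - 1)) (0, 0)).1)),
         winUpd data n m st.2 i)
      else (st.1, winUpd data n m st.2 i)) := rfl

-- the slot values finally stored at position p (B's per-position formula)
def FrF (data : List Int) (n m t : Int) (p : Nat) : Int :=
  if (winSpec data n m p).length = 0 then 10000
  else (p : Int) + (PySem.List.pyGetD (winSpec data n m p)
    (min (if t > 0 then t - 1 else 0) (PySem.List.len (winSpec data n m p) - 1)) (0, 0)).2

def FvF (data : List Int) (n m t : Int) (p : Nat) : Option Int :=
  if (winSpec data n m p).length = 0 then none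
  else some (PySem.List.pyGetD (winSpec data n m p)
    (min (if t > 0 then t - 1 else 0) (PySem.List.len (winSpec data n m p) - 1)) (0, 0)).1

-- ---- basic facts about insortLex ----

lemma insortLex_nil (p : Int × Int) : insortLex [] p = [p] := rfl

lemma insortLex_cons (q : Int × Int) (rest : List (Int × Int)) (p : Int × Int) :
    insortLex (q :: rest) p =
      if p.1 < q.1 ∨ (p.1 = q.1 ∧ p.2 < q.2) then p :: q :: rest else q :: insortLex rest p := rfl

lemma insortLex_perm (s : List (Int × Int)) (p : Int × Int) :
    (insortLex s p).Perm (p :: s) := by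
  induction s with
  | nil => rw [insortLex_nil]
  | cons q rest ih =>
    rw [insortLex_cons]
    by_cases h : p.1 < q.1 ∨ (p.1 = q.1 ∧ p.2 < q.2)
    · rw [if_pos h]
    · rw [if_neg h]
      exact (ih.cons q).trans (List.Perm.swap p q rest)

lemma insortLex_pairwise (s : List (Int × Int)) (p : Int × Int)
    (hs : s.Pairwise lexR) (hne : ∀ q ∈ s, q.2 ≠ p.2) :
    (insortLex s p).Pairwise lexR := by
  induction s with
  | nil => rw [insortLex_nil]; simp
  | cons q rest ih =>
    rw [List.pairwise_cons] at hs
    obtain ⟨hq, hrest⟩ := hs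
    rw [insortLex_cons]
    by_cases h : p.1 < q.1 ∨ (p.1 = q.1 ∧ p.2 < q.2)
    · rw [if_pos h]
      rw [List.pairwise_cons]
      refine ⟨?_, List.Pairwise.cons hq hrest⟩
      intro a ha
      rcases List.mem_cons.mp ha with h1 | h1
      · subst h1; exact h
      · exact lexR_trans h (hq a h1)
    · rw [if_neg h]
      have hqp : lexR q p := lexR_total_of_ne h (hne q (by simp))
      rw [List.pairwise_cons]
      constructor
      · intro a ha
        rcases List.mem_cons.mp ((insortLex_perm rest p).mem_iff.mp ha) with h1 | h1
        · subst h1; exact hqp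
        · exact hq a h1
      · exact ih hrest (fun q' hq' => hne q' (by simp [hq']))

lemma foldl_insortLex_perm (l : List (Int × Int)) :
    ∀ acc, ((l.foldl insortLex acc)).Perm (acc ++ l) := by
  induction l with
  | nil => intro acc; simp
  | cons b l' ih =>
    intro acc
    simp only [List.foldl_cons]
    exact ((ih _).trans (((insortLex_perm acc b).append_right l').trans
      List.perm_middle.symm))

lemma foldl_insortLex_pairwise (l : List (Int × Int)) :
    ∀ acc, acc.Pairwise lexR → (∀ a ∈ acc, ∀ b ∈ l, a.2 ≠ b.2) →
      l.Pairwise (fun a b => a.2 ≠ b.2) → ((l.foldl insortLex acc)).Pairwise lexR := by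
  induction l with
  | nil => intro acc h _ _; simpa using h
  | cons b l' ih =>
    intro acc hacc hcross hl
    rw [List.pairwise_cons] at hl
    obtain ⟨hb, hl'⟩ := hl
    simp only [List.foldl_cons]
    apply ih
    · exact insortLex_pairwise acc b hacc (fun q hq => hcross q hq b (by simp))
    · intro a ha x hx
      rcases List.mem_cons.mp ((insortLex_perm acc b).mem_iff.mp ha) with h1 | h1
      · subst h1; exact hb x hx
      · exact hcross a h1 x (List.mem_cons_of_mem _ hx)
    · exact hl'

lemma lex_sorted_unique {l1 l2 : List (Int × Int)} (hp : l1.Perm l2)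
    (h1 : l1.Pairwise lexR) (h2 : l2.Pairwise lexR) : l1 = l2 := by
  induction l1 generalizing l2 with
  | nil => exact hp.nil_eq
  | cons a t1 ih =>
    cases l2 with
    | nil =>
      have := hp.length_eq
      simp at this
    | cons b t2 =>
      rw [List.pairwise_cons] at h1 h2
      obtain ⟨ha1, ht1⟩ := h1
      obtain ⟨hb2, ht2⟩ := h2
      have hab : a = b := by
        by_contra hne
        have hamem : a ∈ t2 := by
          have hx : a ∈ b :: t2 := hp.mem_iff.mp (by simp)
          rcases List.mem_cons.mp hx with h | h
          · exact absurd h hne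
          · exact h
        have hbmem : b ∈ t1 := by
          have hx : b ∈ a :: t1 := hp.mem_iff.mpr (by simp)
          rcases List.mem_cons.mp hx with h | h
          · exact absurd h.symm hne
          · exact h
        have h3 : lexR b a := hb2 a hamem
        have h4 : lexR a b := ha1 b hbmem
        unfold lexR at h3 h4
        omega
      subst hab
      have hpt : t1.Perm t2 := (List.perm_cons a).mp hp
      rw [ih hpt ht1 ht2]

lemma insertBy_fst_nil (p : Int × Int) :
    PySem.List.insertBy (fun a b => decide (a.1 < b.1)) p [] = [p] := by
  rw [PySem.List.insertBy.eq_def]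

lemma insertBy_fst_cons (p q : Int × Int) (rest : List (Int × Int)) :
    PySem.List.insertBy (fun a b => decide (a.1 < b.1)) p (q :: rest)
      = if p.1 < q.1 then p :: q :: rest
        else q :: PySem.List.insertBy (fun a b => decide (a.1 < b.1)) p rest := by
  rw [PySem.List.insertBy.eq_def]
  dsimp only
  simp

lemma insertBy_fst_eq_insortLex (acc : List (Int × Int)) (p : Int × Int)
    (h : ∀ q ∈ acc, q.2 < p.2) :
    PySem.List.insertBy (fun a b => decide (a.1 < b.1)) p acc = insortLex acc p := by
  induction acc with
  | nil => rw [insertBy_fst_nil, insortLex_nil]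
  | cons q rest ih =>
    have hq : q.2 < p.2 := h q (by simp)
    rw [insertBy_fst_cons, insortLex_cons]
    by_cases hlt : p.1 < q.1
    · rw [if_pos hlt, if_pos (Or.inl hlt)]
    · have hcond : ¬ (p.1 < q.1 ∨ (p.1 = q.1 ∧ p.2 < q.2)) := by omega
      rw [if_neg hlt, if_neg hcond, ih (fun q' hq' => h q' (List.mem_cons_of_mem _ hq'))]

lemma sorted_fst_eq (l : List (Int × Int)) (hl : l.Pairwise (fun a b => a.2 < b.2)) :
    PySem.List.sorted l (fun x => x.1) false = l.foldl insortLex [] := by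
  have aux : ∀ (l' acc : List (Int × Int)), (∀ a ∈ acc, ∀ b ∈ l', a.2 < b.2) →
      l'.Pairwise (fun a b => a.2 < b.2) →
      l'.foldl (fun acc x => PySem.List.insertBy (fun a b => decide (a.1 < b.1)) x acc) acc
        = l'.foldl insortLex acc := by
    intro l'
    induction l' with
    | nil => intro acc _ _; rfl
    | cons b l'' ih =>
      intro acc hacc hl'
      rw [List.pairwise_cons] at hl'
      obtain ⟨hb, hl''⟩ := hl'
      simp only [List.foldl_cons]
      rw [insertBy_fst_eq_insortLex acc b (fun q hq => hacc q hq b (by simp))]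
      apply ih
      · intro a ha x hx
        rcases List.mem_cons.mp ((insortLex_perm acc b).mem_iff.mp ha) with h1 | h1
        · subst h1; exact hb x hx
        · exact hacc a h1 x (List.mem_cons_of_mem _ hx)
      · exact hl''
  rw [PySem.List.sorted_eq_foldl_insertBy]
  exact aux l [] (by simp) hl

-- ---- windows ----

lemma pairsOf_pairwise_ne (data : List Int) (n m i : Int) :
    (pairsOf data n m i).Pairwise (fun a b => a.2 ≠ b.2) := by
  unfold pairsOf idxs
  exact List.Pairwise.map _ (by intro a b h; dsimp; omega)
    (PySem.List.pairwise_lt_pyRange_one _ _)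

lemma winSpec_perm (data : List Int) (n m i : Int) :
    (winSpec data n m i).Perm (pairsOf data n m i) := by
  unfold winSpec
  simpa using foldl_insortLex_perm (pairsOf data n m i) []

lemma winSpec_pairwise (data : List Int) (n m i : Int) :
    (winSpec data n m i).Pairwise lexR := by
  unfold winSpec
  exact foldl_insortLex_pairwise (pairsOf data n m i) [] (by simp) (by simp)
    (pairsOf_pairwise_ne data n m i)

lemma winSpec_empty_low (data : List Int) (n m i : Int) (h : i - n + 1 ≤ 0) :
    winSpec data n m i = [] := by
  unfold winSpec pairsOf idxs
  rw [PySem.List.pyRange_one_eq_nil (le_trans h (le_max_left _ _))]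
  rfl

lemma winUpd_spec (data : List Int) (n m : Int) (hn : 0 ≤ n) (hm : n < m) (i : Int)
    (hi : 0 ≤ i) :
    winUpd data n m (winSpec data n m (i - 1)) i = winSpec data n m i := by
  unfold winUpd
  by_cases h1 : 0 ≤ i - n
  · by_cases h2 : 0 ≤ i - m
    · -- slide: insert new pair, remove old pair
      simp only [if_pos h1, if_pos h2]
      have hidxold : idxs n m (i - 1) = (i - m) :: PySem.List.pyRange (i - m + 1) (i - n) 1 := by
        unfold idxs
        have e0 : i - 1 - m + 1 = i - m := by ring
        have e2 : i - 1 - n + 1 = i - n := by ring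
        rw [e0, e2, max_eq_right (by omega : (0:Int) ≤ i - m),
          PySem.List.pyRange_one_cons (by omega)]
      have hidxnew : idxs n m i = PySem.List.pyRange (i - m + 1) (i - n) 1 ++ [i - n] := by
        unfold idxs
        have e1 : max 0 (i - m + 1) = i - m + 1 := max_eq_right (by omega)
        rw [e1, PySem.List.pyRange_one_succ_right (by omega)]
      have hpold : pairsOf data n m (i - 1)
          = (PySem.List.pyGetD data (i - m) 0, -(i - m))
            :: (PySem.List.pyRange (i - m + 1) (i - n) 1).map (fun idx => (dAt data idx, -idx)) := by
        unfold pairsOf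
        rw [hidxold]; simp [dAt]
      have hpnew : pairsOf data n m i
          = (PySem.List.pyRange (i - m + 1) (i - n) 1).map (fun idx => (dAt data idx, -idx))
            ++ [(PySem.List.pyGetD data (i - n) 0, -(i - n))] := by
        unfold pairsOf
        rw [hidxnew]; simp [dAt]
      have hsnd : ∀ q ∈ winSpec data n m (i - 1),
          q.2 ≠ (PySem.List.pyGetD data (i - n) 0, -(i - n)).2 := by
        intro q hq
        dsimp only
        have hqp : q ∈ pairsOf data n m (i - 1) := (winSpec_perm data n m (i - 1)).mem_iff.mp hq
        rw [hpold] at hqp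
        rcases List.mem_cons.mp hqp with h | h
        · rw [h]; dsimp; omega
        · obtain ⟨idx, hidx', heq⟩ := List.mem_map.mp h
          have hlt : idx < i - n := (PySem.List.mem_pyRange_one.mp hidx').2
          rw [← heq]; dsimp; omega
      have hw1perm : (insortLex (winSpec data n m (i - 1))
            (PySem.List.pyGetD data (i - n) 0, -(i - n))).Perm
          ((PySem.List.pyGetD data (i - n) 0, -(i - n)) :: winSpec data n m (i - 1)) :=
        insortLex_perm _ _
      have hopmem : (PySem.List.pyGetD data (i - m) 0, -(i - m))
          ∈ insortLex (winSpec data n m (i - 1)) (PySem.List.pyGetD data (i - n) 0, -(i - n)) := by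
        apply hw1perm.mem_iff.mpr
        apply List.mem_cons_of_mem
        apply (winSpec_perm data n m (i - 1)).mem_iff.mpr
        rw [hpold]; simp
      rw [PySem.List.remove?_eq_some_erase _ _ hopmem]
      simp only [Option.getD_some]
      apply lex_sorted_unique
      · -- permutation
        have hne : (PySem.List.pyGetD data (i - n) 0, -(i - n))
            ≠ (PySem.List.pyGetD data (i - m) 0, -(i - m)) := by
          intro he
          have := congrArg Prod.snd he
          dsimp at this; omega
        have h4 : ((insortLex (winSpec data n m (i - 1))
              (PySem.List.pyGetD data (i - n) 0, -(i - n))).erase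
                (PySem.List.pyGetD data (i - m) 0, -(i - m))).Perm
            (((PySem.List.pyGetD data (i - n) 0, -(i - n))
              :: pairsOf data n m (i - 1)).erase
                (PySem.List.pyGetD data (i - m) 0, -(i - m))) :=
          List.Perm.erase _ (hw1perm.trans (List.Perm.cons _ (winSpec_perm data n m (i - 1))))
        have h5 : (((PySem.List.pyGetD data (i - n) 0, -(i - n))
              :: pairsOf data n m (i - 1)).erase
                (PySem.List.pyGetD data (i - m) 0, -(i - m)))
            = (PySem.List.pyGetD data (i - n) 0, -(i - n))
              :: (PySem.List.pyRange (i - m + 1) (i - n) 1).map (fun idx => (dAt data idx, -idx)) := by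
          rw [List.erase_cons_tail (by simpa using hne)]
          rw [hpold, List.erase_cons_head]
        have h6 : (winSpec data n m i).Perm
            ((PySem.List.pyGetD data (i - n) 0, -(i - n))
              :: (PySem.List.pyRange (i - m + 1) (i - n) 1).map (fun idx => (dAt data idx, -idx))) := by
          refine (winSpec_perm data n m i).trans ?_
          rw [hpnew]
          exact List.perm_append_singleton _ _
        exact (h4.trans (h5 ▸ List.Perm.refl _)).trans h6.symm
      · -- pairwise of the erase
        apply List.Pairwise.sublist List.erase_sublist
        exact insortLex_pairwise _ _ (winSpec_pairwise data n m (i - 1)) hsnd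
      · exact winSpec_pairwise data n m i
    · -- pure growth
      simp only [if_pos h1, if_neg h2]
      have hidx : idxs n m i = idxs n m (i - 1) ++ [i - n] := by
        unfold idxs
        have e0 : i - 1 - m + 1 = i - m := by ring
        have e : i - 1 - n + 1 = i - n := by ring
        rw [e0, e, max_eq_left (by omega : i - m + 1 ≤ (0:Int)),
          max_eq_left (by omega : i - m ≤ (0:Int)),
          PySem.List.pyRange_one_succ_right (by omega)]
      symm
      unfold winSpec pairsOf
      rw [hidx, List.map_append, List.foldl_append]
      simp [dAt]
  · -- window still empty
    have h2 : ¬ 0 ≤ i - m := by omega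
    simp only [if_neg h1, if_neg h2]
    rw [winSpec_empty_low data n m (i - 1) (by omega), winSpec_empty_low data n m i (by omega)]

lemma aryOf_eq_rev (data : List Int) (n m i : Int) (hi : 0 ≤ i) :
    aryOf data n m i = ((pairsOf data n m i).map (fun w => (w.1, i + w.2))).reverse := by
  unfold aryOf pairsOf idxs
  apply List.ext_getElem
  · simp [PySem.List.length_pyRange_one]
    omega
  · intro r h1 h2
    simp only [List.getElem_reverse, List.getElem_map, List.length_map,
      PySem.List.getElem_pyRange_one, PySem.List.length_pyRange_one]
    simp only [List.length_map, PySem.List.length_pyRange_one] at h1 h2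
    have harg : (max 0 (i - m + 1)
          + ((((i - n + 1 - max 0 (i - m + 1)).toNat - 1 - r : Nat)) : Int))
        = i - (n + (r : Int)) := by omega
    rw [harg]
    rw [Prod.mk.injEq]
    exact ⟨rfl, by omega⟩

lemma sorted_ary_eq (data : List Int) (n m i : Int) (hi : 0 ≤ i) :
    PySem.List.sorted (aryOf data n m i) (fun x => x.1) false
      = (winSpec data n m i).map (fun w => (w.1, i + w.2)) := by
  have hsnd : (aryOf data n m i).Pairwise (fun a b => a.2 < b.2) := by
    unfold aryOf
    exact List.Pairwise.map _ (by intro a b h; dsimp; omega)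
      (PySem.List.pairwise_lt_pyRange_one _ _)
  rw [sorted_fst_eq _ hsnd]
  apply lex_sorted_unique
  · have p1 : ((aryOf data n m i).foldl insortLex []).Perm (aryOf data n m i) := by
      simpa using foldl_insortLex_perm (aryOf data n m i) []
    have p3 : ((winSpec data n m i).map (fun w => (w.1, i + w.2))).Perm
        ((pairsOf data n m i).map (fun w => (w.1, i + w.2))) :=
      (winSpec_perm data n m i).map _
    refine p1.trans (?_ : (aryOf data n m i).Perm _)
    rw [aryOf_eq_rev data n m i hi]
    exact (List.reverse_perm _).trans p3.symm
  · apply foldl_insortLex_pairwise _ [] (by simp) (by simp)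
    exact hsnd.imp (by intro a b h; omega)
  · exact List.Pairwise.map _ (by intro a b h; unfold lexR at *; dsimp at *; omega)
      (winSpec_pairwise data n m i)

lemma aryOf_length_eq (data : List Int) (n m i : Int) (hi : 0 ≤ i) :
    (aryOf data n m i).length = (winSpec data n m i).length := by
  have h := congrArg List.length (sorted_ary_eq data n m i hi)
  rwa [PySem.List.length_sorted, List.length_map] at h

lemma aryBuild_eq (data : List Int) (i m : Int) (h0 : 0 ≤ i) (hic : i < (data.length : Int)) :
    ∀ fuel : Nat, ∀ j : Int, (m - j).toNat = fuel → 0 ≤ j → ∀ acc,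
      aryBuild data i m j acc
        = acc ++ (PySem.List.pyRange j (min m (i + 1)) 1).map (fun jj => (dAt data (i - jj), jj)) := by
  intro fuel
  induction fuel with
  | zero =>
    intro j hf hj acc
    have hjm : ¬ j < m := by omega
    unfold aryBuild
    rw [dif_neg hjm, PySem.List.pyRange_one_eq_nil (by omega)]
    simp
  | succ f ihf =>
    intro j hf hj acc
    have hjm : j < m := by omega
    unfold aryBuild
    rw [dif_pos hjm]
    by_cases hneg : i - j < 0
    · rw [if_pos hneg, PySem.List.pyRange_one_eq_nil (by omega)]
      simp
    · rw [if_neg hneg]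
      have hg : PySem.List.pyGet? data (i - j) = some (data[(i - j).toNat]'(by omega)) :=
        PySem.List.pyGet?_eq_some_getElem data (by omega) (by omega)
      rw [hg]
      simp only []
      rw [ihf (j + 1) (by omega) (by omega)]
      have hcons : PySem.List.pyRange j (min m (i + 1)) 1
          = j :: PySem.List.pyRange (j + 1) (min m (i + 1)) 1 :=
        PySem.List.pyRange_one_cons (lt_min hjm (by omega))
      rw [hcons, List.map_cons]
      have hd : dAt data (i - j) = data[(i - j).toNat]'(by omega) := by
        unfold dAt
        exact PySem.List.pyGetD_eq_getElem data 0 (by omega) (by omega)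
      rw [hd]
      simp

-- ---- set-on-map-of-range ----

lemma map_range_set {α : Type} (c k : Nat) (f : Nat → α) (x : α) :
    ((List.range c).map f).set k x = (List.range c).map (fun p => if p = k then x else f p) := by
  apply List.ext_getElem
  · simp
  · intro i h1 h2
    simp only [List.getElem_set, List.getElem_map, List.getElem_range]
    by_cases hik : k = i
    · simp [hik]
    · rw [if_neg hik, if_neg (fun h => hik (Eq.symm h))]

lemma map_if_lt_succ_set {α : Type} (c k : Nat) (F : Nat → α) (d x : α) (hx : F k = x) :
    ((List.range c).map (fun p => if p < k + 1 then d else F p)).set k x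
      = (List.range c).map (fun p => if p < k then d else F p) := by
  rw [map_range_set]
  apply List.map_congr_left
  intro p _
  by_cases h2 : p = k
  · subst h2; simp [hx]
  · have e : (p < k + 1) ↔ (p < k) := by omega
    simp [h2, e]

lemma map_if_lt_succ_id {α : Type} (c k : Nat) (F : Nat → α) (d : α) (hx : F k = d) :
    (List.range c).map (fun p => if p < k + 1 then d else F p)
      = (List.range c).map (fun p => if p < k then d else F p) := by
  apply List.map_congr_left
  intro p _
  by_cases h2 : p = k
  · subst h2; simp [hx]
  · have e : (p < k + 1) ↔ (p < k) := by omega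
    simp [e]

lemma map_if_lt_set_B {α : Type} (c k : Nat) (F : Nat → α) (d x : α) (hx : F k = x) :
    ((List.range c).map (fun p => if p < k then F p else d)).set k x
      = (List.range c).map (fun p => if p < k + 1 then F p else d) := by
  rw [map_range_set]
  apply List.map_congr_left
  intro p _
  by_cases h2 : p = k
  · subst h2; simp [hx]
  · have e : (p < k + 1) ↔ (p < k) := by omega
    simp [h2, e]

lemma map_if_lt_id_B {α : Type} (c k : Nat) (F : Nat → α) (d : α) (hx : F k = d) :
    (List.range c).map (fun p => if p < k then F p else d)
      = (List.range c).map (fun p => if p < k + 1 then F p else d) := by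
  apply List.map_congr_left
  intro p _
  by_cases h2 : p = k
  · subst h2; simp [hx]
  · have e : (p < k + 1) ↔ (p < k) := by omega
    simp [e]

lemma replicate_eq_map_range {α : Type} (c : Nat) (d : α) (F : Nat → α) :
    List.replicate c d = (List.range c).map (fun p => if p < c then d else F p) := by
  apply List.ext_getElem
  · simp
  · intro i h1 h2
    simp only [List.getElem_replicate, List.getElem_map, List.getElem_range]
    rw [if_pos (by simpa using h1)]

lemma replicate_eq_map_range0 {α : Type} (c : Nat) (d : α) (F : Nat → α) :
    List.replicate c d = (List.range c).map (fun p => if p < 0 then F p else d) := by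
  apply List.ext_getElem
  · simp
  · intro i h1 h2
    simp only [List.getElem_replicate, List.getElem_map, List.getElem_range]
    rw [if_neg (Nat.not_lt_zero _)]

-- ---- the A loop ----

lemma A_step (data : List Int) (n m t : Int) (hn : 0 ≤ n) (hm : n < m) (k : Nat)
    (hkc : k < data.length) :
    stepA data n m t
        ((List.range data.length).map (fun p => if p < k + 1 then (10000 : Int) else FrF data n m t p),
         (List.range data.length).map (fun p => if p < k + 1 then (none : Option Int) else FvF data n m t p))
        (k : Int)
      = ((List.range data.length).map (fun p => if p < k then (10000 : Int) else FrF data n m t p),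
         (List.range data.length).map (fun p => if p < k then (none : Option Int) else FvF data n m t p)) := by
  have hary : aryBuild data (k : Int) m n [] = aryOf data n m (k : Int) := by
    rw [aryBuild_eq data (k : Int) m (by omega) (by exact_mod_cast hkc) (m - n).toNat n rfl hn []]
    rw [aryOf]
    simp
  simp only [stepA]
  rw [hary]
  by_cases hlen : (winSpec data n m (k : Int)).length = 0
  · have hary0 : ¬ (aryOf data n m (k : Int)).length > 0 := by
      rw [aryOf_length_eq data n m _ (by omega)]; omega
    rw [if_neg hary0]
    have hFr : FrF data n m t k = 10000 := by unfold FrF; rw [if_pos hlen]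
    have hFv : FvF data n m t k = none := by unfold FvF; rw [if_pos hlen]
    rw [Prod.mk.injEq]
    exact ⟨map_if_lt_succ_id _ _ _ _ hFr, map_if_lt_succ_id _ _ _ _ hFv⟩
  · have hary0 : (aryOf data n m (k : Int)).length > 0 := by
      rw [aryOf_length_eq data n m _ (by omega)]; omega
    rw [if_pos hary0]
    rw [sorted_ary_eq data n m (k : Int) (by omega)]
    have hlenmap : PySem.List.len ((winSpec data n m (k : Int)).map (fun w => (w.1, (k : Int) + w.2)))
        = PySem.List.len (winSpec data n m (k : Int)) := by
      simp [PySem.List.len_eq]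
    rw [hlenmap]
    have hk00 : (0 : Int) ≤ (if t > 0 then t - 1 else 0) := by split <;> omega
    have hbounds : 0 ≤ min (if t > 0 then t - 1 else 0) (PySem.List.len (winSpec data n m (k : Int)) - 1)
        ∧ min (if t > 0 then t - 1 else 0) (PySem.List.len (winSpec data n m (k : Int)) - 1)
          < ((winSpec data n m (k : Int)).length : Int) := by
      rw [PySem.List.len_eq]
      omega
    have hsel : PySem.List.pyGetD ((winSpec data n m (k : Int)).map (fun w => (w.1, (k : Int) + w.2)))
          (min (if t > 0 then t - 1 else 0) (PySem.List.len (winSpec data n m (k : Int)) - 1)) (0, 0)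
        = ((PySem.List.pyGetD (winSpec data n m (k : Int))
              (min (if t > 0 then t - 1 else 0) (PySem.List.len (winSpec data n m (k : Int)) - 1)) (0, 0)).1,
           (k : Int) + (PySem.List.pyGetD (winSpec data n m (k : Int))
              (min (if t > 0 then t - 1 else 0) (PySem.List.len (winSpec data n m (k : Int)) - 1)) (0, 0)).2) := by
      rw [PySem.List.pyGetD_eq_getElem _ _ hbounds.1 (by simpa using hbounds.2)]
      rw [PySem.List.pyGetD_eq_getElem _ _ hbounds.1 hbounds.2]
      rw [List.getElem_map]
    rw [hsel]
    simp only [PySem.List.pySetD_natCast]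
    have hFr : FrF data n m t k = (k : Int) + (PySem.List.pyGetD (winSpec data n m (k : Int))
        (min (if t > 0 then t - 1 else 0) (PySem.List.len (winSpec data n m (k : Int)) - 1)) (0, 0)).2 := by
      unfold FrF; rw [if_neg hlen]
    have hFv : FvF data n m t k = some (PySem.List.pyGetD (winSpec data n m (k : Int))
        (min (if t > 0 then t - 1 else 0) (PySem.List.len (winSpec data n m (k : Int)) - 1)) (0, 0)).1 := by
      unfold FvF; rw [if_neg hlen]
    rw [Prod.mk.injEq]
    exact ⟨map_if_lt_succ_set _ _ _ _ _ hFr, map_if_lt_succ_set _ _ _ _ _ hFv⟩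

lemma A_loop (data : List Int) (n m t : Int) (hn : 0 ≤ n) (hm : n < m) :
    ∀ k : Nat, k ≤ data.length →
      (PySem.List.pyRange ((k : Int) - 1) (-1) (-1)).foldl (stepA data n m t)
        ((List.range data.length).map (fun p => if p < k then (10000 : Int) else FrF data n m t p),
         (List.range data.length).map (fun p => if p < k then (none : Option Int) else FvF data n m t p))
      = ((List.range data.length).map (FrF data n m t),
         (List.range data.length).map (FvF data n m t)) := by
  intro k
  induction k with
  | zero =>
    intro _
    rw [PySem.List.pyRange_neg_one_eq_nil (by omega)]
    simp only [List.foldl_nil]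
    rw [Prod.mk.injEq]
    constructor <;> (apply List.map_congr_left; intro p _; simp)
  | succ k ih =>
    intro hk1
    have hkc : k < data.length := by omega
    have e1 : ((k + 1 : Nat) : Int) - 1 = (k : Int) := by push_cast; ring
    rw [e1, PySem.List.pyRange_neg_one_cons (by omega)]
    rw [List.foldl_cons]
    rw [A_step data n m t hn hm k hkc]
    exact ih (by omega)

-- ---- the B loop ----

lemma B_loop (data : List Int) (n m t : Int) (hn : 0 ≤ n) (hm : n < m) :
    ∀ d : Nat, ∀ k : Nat, k + d = data.length →
      (PySem.List.pyRange (k : Int) ((data.length : Int)) 1).foldl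
          (stepB data n m (if t > 0 then t - 1 else 0))
          (((List.range data.length).map (fun p => if p < k then FrF data n m t p else (10000 : Int)),
            (List.range data.length).map (fun p => if p < k then FvF data n m t p else (none : Option Int))),
           winSpec data n m ((k : Int) - 1))
      = (((List.range data.length).map (FrF data n m t),
          (List.range data.length).map (FvF data n m t)),
         winSpec data n m ((data.length : Int) - 1)) := by
  intro d
  induction d with
  | zero =>
    intro k hk
    have hkc : k = data.length := by omega
    subst hkc
    rw [PySem.List.pyRange_one_eq_nil (by omega)]
    simp only [List.foldl_nil]
    rw [Prod.mk.injEq, Prod.mk.injEq]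
    refine ⟨⟨?_, ?_⟩, rfl⟩ <;>
      (apply List.map_congr_left; intro p hp; rw [if_pos (List.mem_range.mp hp)])
  | succ d ih =>
    intro k hk
    have hkc : k < data.length := by omega
    rw [PySem.List.pyRange_one_cons (by exact_mod_cast hkc)]
    rw [List.foldl_cons]
    rw [stepB_eq]
    rw [winUpd_spec data n m hn hm (k : Int) (by omega)]
    have hnext := ih (k + 1) (by omega)
    have e2 : ((k + 1 : Nat) : Int) = (k : Int) + 1 := by push_cast; ring
    rw [e2] at hnext
    have e3 : (k : Int) + 1 - 1 = (k : Int) := by ring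
    rw [e3] at hnext
    by_cases hlen : (winSpec data n m (k : Int)).length = 0
    · rw [if_neg (show ¬ (winSpec data n m (k : Int)).length > 0 by omega)]
      have hFr : FrF data n m t k = 10000 := by unfold FrF; rw [if_pos hlen]
      have hFv : FvF data n m t k = none := by unfold FvF; rw [if_pos hlen]
      rw [map_if_lt_id_B _ _ _ _ hFr, map_if_lt_id_B _ _ _ _ hFv]
      exact hnext
    · rw [if_pos (show (winSpec data n m (k : Int)).length > 0 by omega)]
      simp only [PySem.List.pySetD_natCast]
      have hFr : FrF data n m t k = (k : Int) + (PySem.List.pyGetD (winSpec data n m (k : Int))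
          (min (if t > 0 then t - 1 else 0) (PySem.List.len (winSpec data n m (k : Int)) - 1)) (0, 0)).2 := by
        unfold FrF; rw [if_neg hlen]
      have hFv : FvF data n m t k = some (PySem.List.pyGetD (winSpec data n m (k : Int))
          (min (if t > 0 then t - 1 else 0) (PySem.List.len (winSpec data n m (k : Int)) - 1)) (0, 0)).1 := by
        unfold FvF; rw [if_neg hlen]
      rw [map_if_lt_set_B _ _ _ _ _ hFr, map_if_lt_set_B _ _ _ _ _ hFv]
      exact hnext

-- ---- assembling ----

lemma A_trivial (data : List Int) (n m t : Int) (hmn : m ≤ n) :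
    FINDLOWBARS data n m t
      = (PySem.List.pyRepeat [10000] (PySem.List.len data),
         PySem.List.pyRepeat [none] (PySem.List.len data)) := by
  have hstep : ∀ rv (i : Int), stepA data n m t rv i = rv := by
    intro rv i
    have hary : aryBuild data i m n [] = [] := by
      unfold aryBuild; rw [dif_neg (by omega)]
    simp only [stepA]
    rw [hary]
    simp
  have hfold : ∀ (L : List Int) (init : List Int × List (Option Int)),
      L.foldl (stepA data n m t) init = init := by
    intro L
    induction L with
    | nil => intro init; rfl
    | cons a L ih =>
      intro init
      rw [List.foldl_cons, hstep init a]
      exact ih init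
  unfold FINDLOWBARS
  dsimp only
  exact hfold _ _

theorem FINDLOWBARS_spec_aux (data : List Int) (n : Int) (m : Int) (t : Int)
    (hpre : Pre_FINDLOWBARS data n m t) :
    FINDLOWBARS data n m t = FINDLOWBARS_alt data n m t := by
  by_cases hmn : m ≤ n
  · rw [A_trivial data n m t hmn]
    unfold FINDLOWBARS_alt
    rw [if_pos hmn]
  · have hm : n < m := by omega
    rcases hpre with hd | hmn2 | hn
    · subst hd
      have e1 : PySem.List.pyRange ((PySem.List.len ([] : List Int)) - 1) (-1) (-1) = [] :=
        PySem.List.pyRange_neg_one_eq_nil (by simp [PySem.List.len_eq])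
      have e2 : PySem.List.pyRange 0 (PySem.List.len ([] : List Int)) 1 = [] :=
        PySem.List.pyRange_one_eq_nil (by simp [PySem.List.len_eq])
      unfold FINDLOWBARS FINDLOWBARS_alt
      dsimp only
      rw [if_neg hmn]
      rw [e1, e2]
      simp
    · exact absurd hmn2 hmn
    · -- main case: 0 ≤ n < m
      have hA : FINDLOWBARS data n m t
          = ((List.range data.length).map (FrF data n m t),
             (List.range data.length).map (FvF data n m t)) := by
        unfold FINDLOWBARS
        dsimp only
        simp only [PySem.List.len_eq, PySem.List.pyRepeat_singleton, Int.toNat_natCast]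
        rw [replicate_eq_map_range data.length (10000 : Int) (FrF data n m t),
          replicate_eq_map_range data.length (none : Option Int) (FvF data n m t)]
        exact A_loop data n m t hn hm data.length (le_refl _)
      have hB : FINDLOWBARS_alt data n m t
          = ((List.range data.length).map (FrF data n m t),
             (List.range data.length).map (FvF data n m t)) := by
        unfold FINDLOWBARS_alt
        dsimp only
        rw [if_neg hmn]
        simp only [PySem.List.len_eq, PySem.List.pyRepeat_singleton, Int.toNat_natCast]
        rw [replicate_eq_map_range0 data.length (10000 : Int) (FrF data n m t),
          replicate_eq_map_range0 data.length (none : Option Int) (FvF data n m t)]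
        have hws : ([] : List (Int × Int)) = winSpec data n m (0 - 1) :=
          (winSpec_empty_low data n m (0 - 1) (by omega)).symm
        rw [hws]
        have hloop := B_loop data n m t hn hm data.length 0 (by omega)
        simp only [Nat.cast_zero] at hloop
        rw [hloop]
      rw [hA, hB]

-- ===== VERDICT (by name: the statement is the Claim_ definition above) =====
theorem FINDLOWBARS_spec : Claim_equal_FINDLOWBARS := by
  unfold Claim_equal_FINDLOWBARS
  intro data n m t _ hpre
  unfold Spec_FINDLOWBARS
  exact FINDLOWBARS_spec_aux data n m t hpre
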